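-- pv_equiv track=rewrite | github.com/Abhijeetkumar8582/rfpbackend | app/services/chunking.py | pages_for_char_span
-- ===== SOURCE A (Python) =====
-- def pages_for_char_span(
--     start: int,
--     end: int,
--     page_starts: list[int],
--     text_len: int,
-- ) -> tuple[int | None, int | None]:
--     """
--     Map a character span in flattened PDF text to 1-based physical PDF page numbers.
--     page_starts[i] is the char index where page i+1 begins.
--     """
--     if not page_starts or start < 0 or end <= start or not text_len:
--         return None, None
--     tl = max(0, text_len)
--
--     def page_1based_for_char(c: int) -> int:
--         c = max(0, min(c, tl - 1)) if tl else 0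
--         for i in range(len(page_starts) - 1, -1, -1):
--             if c >= page_starts[i]:
--                 return i + 1
--         return 1
--
--     lo = page_1based_for_char(start)
--     hi = page_1based_for_char(max(start, end - 1))
--     return lo, hi
-- ===== SOURCE B (Python) =====
-- def pages_for_char_span(
--     start: int,
--     end: int,
--     page_starts: list[int],
--     text_len: int,
-- ) -> tuple[int | None, int | None]:
--     # Single forward pass: track, for both clamped endpoints at once,
--     # the last (highest) index whose page start is <= that endpoint.
--     if not page_starts or start < 0 or end <= start or not text_len:
--         return None, None
--     tl = max(0, text_len)
--
--     def clamp(c: int) -> int: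
--         return max(0, min(c, tl - 1)) if tl else 0
--
--     clo = clamp(start)
--     chi = clamp(max(start, end - 1))
--     lo = hi = 1
--     for i, p in enumerate(page_starts):
--         if p <= clo:
--             lo = i + 1
--         if p <= chi:
--             hi = i + 1
--     return lo, hi
-- ===== Notes on version B (the rewrite author's own statement) =====
-- stated objective: alternative
-- what changed: B replaces A's two backward early-return scans (one per endpoint) with a single forward pass over enumerate(page_starts) that tracks, for both clamped endpoints simultaneously, the last index whose page start does not exceed it.
import Mathlib
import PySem

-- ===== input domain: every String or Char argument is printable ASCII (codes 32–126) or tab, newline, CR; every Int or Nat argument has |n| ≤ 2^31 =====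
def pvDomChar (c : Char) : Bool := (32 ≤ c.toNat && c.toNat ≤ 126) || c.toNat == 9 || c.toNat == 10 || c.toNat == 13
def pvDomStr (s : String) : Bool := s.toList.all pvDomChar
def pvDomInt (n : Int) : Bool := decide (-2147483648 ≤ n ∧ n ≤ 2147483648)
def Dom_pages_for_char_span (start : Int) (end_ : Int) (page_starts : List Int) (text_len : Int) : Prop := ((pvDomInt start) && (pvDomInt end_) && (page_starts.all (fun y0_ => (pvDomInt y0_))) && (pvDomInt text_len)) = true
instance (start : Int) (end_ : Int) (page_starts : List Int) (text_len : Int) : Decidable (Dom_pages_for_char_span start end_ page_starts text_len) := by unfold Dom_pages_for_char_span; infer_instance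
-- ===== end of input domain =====

-- B replaces A's two backward early-return scans with one forward fold tracking both endpoints at once (alternative structure, same cost).


-- ===== PORT A =====
-- the backward early-return loop 'for i in range(len(ps)-1, -1, -1): if c >= ps[i]: return i+1' / 'return 1',
-- as structural recursion on the remaining index count; ps.getD k 0 is exact since k is always in range here
def pvPageLoopA (ps : List Int) (c : Int) : Nat → Int
  | 0 => 1
  | k + 1 => if c ≥ ps.getD k 0 then (k : Int) + 1 else pvPageLoopA ps c k

-- page_1based_for_char
def pvPageA (ps : List Int) (tl : Int) (c : Int) : Int :=
  let c := if tl ≠ 0 then max 0 (min c (tl - 1)) else 0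
  pvPageLoopA ps c ps.length

def pages_for_char_span (start : Int) (end_ : Int) (page_starts : List Int) (text_len : Int) : Option Int × Option Int :=
  if page_starts = [] ∨ start < 0 ∨ end_ ≤ start ∨ text_len = 0 then (none, none)
  else
    let tl := max 0 text_len
    let lo := pvPageA page_starts tl start
    let hi := pvPageA page_starts tl (max start (end_ - 1))
    (some lo, some hi)

-- ===== PORT B =====
def pages_for_char_span_alt (start : Int) (end_ : Int) (page_starts : List Int) (text_len : Int) : Option Int × Option Int :=
  if page_starts = [] ∨ start < 0 ∨ end_ ≤ start ∨ text_len = 0 then (none, none)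
  else
    let tl := max 0 text_len
    let clamp : Int → Int := fun c => if tl ≠ 0 then max 0 (min c (tl - 1)) else 0
    let clo := clamp start
    let chi := clamp (max start (end_ - 1))
    let p := (PySem.List.enumerate page_starts 0).foldl
      (fun (acc : Int × Int) ip =>
        (if ip.2 ≤ clo then ip.1 + 1 else acc.1,
         if ip.2 ≤ chi then ip.1 + 1 else acc.2)) (1, 1)
    (some p.1, some p.2)

-- ===== PRECONDITION & SPEC =====
def Spec_pages_for_char_span (start : Int) (end_ : Int) (page_starts : List Int) (text_len : Int) (out : Option Int × Option Int) : Prop := out = pages_for_char_span_alt start end_ page_starts text_len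
instance (start : Int) (end_ : Int) (page_starts : List Int) (text_len : Int) (out : Option Int × Option Int) : Decidable (Spec_pages_for_char_span start end_ page_starts text_len out) := by unfold Spec_pages_for_char_span; infer_instance

-- ===== CLAIM (what is proved, stated in full; the proofs are below) =====
def Claim_equal_pages_for_char_span : Prop := ∀ (start : Int) (end_ : Int) (page_starts : List Int) (text_len : Int), Dom_pages_for_char_span start end_ page_starts text_len → Spec_pages_for_char_span start end_ page_starts text_len (pages_for_char_span start end_ page_starts text_len)

-- ===== LEMMAS AND PROOFS =====

-- B's paired fold splits into two independent single folds
theorem pvPairFold (clo chi : Int) (l : List (Int × Int)) (a b : Int) :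
    l.foldl (fun (acc : Int × Int) ip =>
        (if ip.2 ≤ clo then ip.1 + 1 else acc.1,
         if ip.2 ≤ chi then ip.1 + 1 else acc.2)) (a, b)
    = (l.foldl (fun acc ip => if ip.2 ≤ clo then ip.1 + 1 else acc) a,
       l.foldl (fun acc ip => if ip.2 ≤ chi then ip.1 + 1 else acc) b) := by
  induction l generalizing a b with
  | nil => rfl
  | cons x xs ih => simp [List.foldl, ih]

-- the backward loop ignores elements past its counter
theorem pvLoopA_append (l : List Int) (x c : Int) :
    ∀ k : Nat, k ≤ l.length → pvPageLoopA (l ++ [x]) c k = pvPageLoopA l c k := by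
  intro k
  induction k with
  | zero => intro _; rfl
  | succ n ih =>
    intro h
    have hn : n < l.length := by omega
    simp [pvPageLoopA, ih (by omega), List.getD, List.getElem?_append_left hn]

-- backward first-match scan = forward last-match fold
theorem pvLoopA_eq_fold (ps : List Int) (c : Int) :
    pvPageLoopA ps c ps.length
      = (PySem.List.enumerate ps 0).foldl (fun acc ip => if ip.2 ≤ c then ip.1 + 1 else acc) 1 := by
  induction ps using List.reverseRecOn with
  | nil => rfl
  | append_singleton l x ih =>
    have hlen : (l ++ [x]).length = l.length + 1 := by simp
    rw [hlen]
    have hget : (l ++ [x]).getD l.length 0 = x := by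
      simp [List.getD]
    rw [PySem.List.enumerate_append]
    simp only [pvPageLoopA, hget, PySem.List.enumerate, List.foldl_append, List.foldl]
    rw [pvLoopA_append l x c l.length (le_refl _), ih]
    by_cases hx : x ≤ c
    · simp [hx, ge_iff_le]
    · simp [hx, ge_iff_le]

-- ===== VERDICT (by name: the statement is the Claim_ definition above) =====
theorem pages_for_char_span_spec : Claim_equal_pages_for_char_span := by
  intro start end_ page_starts text_len _
  unfold Spec_pages_for_char_span pages_for_char_span pages_for_char_span_alt
  by_cases hg : page_starts = [] ∨ start < 0 ∨ end_ ≤ start ∨ text_len = 0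
  · simp [hg]
  · simp only [hg, ite_false]
    simp only [pvPageA, pvPairFold, pvLoopA_eq_fold]
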